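-- pv_equiv track=rewrite | github.com/tehloo/py-practice | GoogleCodejam/__init__.py | get_damage
-- ===== SOURCE A (Python) =====
-- def get_damage(combos):
--     damage = 1
--     total_damage = 0
--     for c in combos:
--         if (c == 'C'):
--             damage *= 2
--         elif (c == 'S'):
--             total_damage += damage
--
--     return total_damage
-- ===== SOURCE B (Python) =====
-- def get_damage(combos):
--     return sum(2 ** combos[:i].count('C') for i, c in enumerate(combos) if c == 'S')
-- ===== Notes on version B (the rewrite author's own statement) =====
-- stated objective: alternative
-- what changed: Replaced A's single pass with a running multiplier by a per-hit closed form: for each 'S' at index i, add 2 to the power of the number of 'C' characters strictly before i, summed in one generator expression.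
import Mathlib
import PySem

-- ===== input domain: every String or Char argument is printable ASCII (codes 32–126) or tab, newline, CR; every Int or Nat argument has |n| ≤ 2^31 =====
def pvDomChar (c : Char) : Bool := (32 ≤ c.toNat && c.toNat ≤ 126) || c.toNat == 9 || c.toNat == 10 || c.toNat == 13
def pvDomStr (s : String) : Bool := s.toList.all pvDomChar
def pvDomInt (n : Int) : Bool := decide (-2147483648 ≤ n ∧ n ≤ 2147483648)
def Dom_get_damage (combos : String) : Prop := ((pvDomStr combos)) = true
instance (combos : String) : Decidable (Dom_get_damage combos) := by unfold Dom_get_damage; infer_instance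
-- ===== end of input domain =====

-- B replaces A's accumulating multiplier pass with a per-hit prefix count: same values, different decomposition (alternative).

-- ===== PORT A =====
def get_damage (combos : String) : Int :=
  (combos.toList.foldl (fun st c =>
    if c = 'C' then (st.1 * 2, st.2)
    else if c = 'S' then (st.1, st.2 + st.1)
    else st) ((1 : Int), (0 : Int))).2

-- ===== PORT B =====
def get_damage_alt (combos : String) : Int :=
  ((PySem.List.enumerate combos.toList 0).map
    (fun ic => if ic.2 = 'S' then (2 : Int) ^ ((combos.toList.take ic.1.toNat).count 'C') else 0)).sum

-- ===== PRECONDITION & SPEC =====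
def Spec_get_damage (combos : String) (out : Int) : Prop := out = get_damage_alt combos
instance (combos : String) (out : Int) : Decidable (Spec_get_damage combos out) := by unfold Spec_get_damage; infer_instance

-- ===== CLAIM (what is proved, stated in full; the proofs are below) =====
def Claim_equal_get_damage : Prop := ∀ (combos : String), Dom_get_damage combos → Spec_get_damage combos (get_damage combos)

-- ===== LEMMAS AND PROOFS =====

def pvStep : Int × Int → Char → Int × Int := fun st c =>
  if c = 'C' then (st.1 * 2, st.2)
  else if c = 'S' then (st.1, st.2 + st.1)
  else st

def pvT (l : List Char) : Int :=
  ((PySem.List.enumerate l 0).map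
    (fun ic => if ic.2 = 'S' then (2 : Int) ^ ((l.take ic.1.toNat).count 'C') else 0)).sum

theorem pv_enumerate_shift {α : Type} (xs : List α) (s : Int) :
    PySem.List.enumerate xs (s + 1) = (PySem.List.enumerate xs s).map (fun p => (p.1 + 1, p.2)) := by
  induction xs generalizing s with
  | nil => simp [PySem.List.enumerate_nil]
  | cons x xs ih =>
      simp [PySem.List.enumerate_cons, ih]

theorem pvT_cons (c : Char) (cs : List Char) :
    pvT (c :: cs) = (if c = 'S' then 1 else 0) + (if c = 'C' then 2 else 1) * pvT cs := by
  unfold pvT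
  rw [PySem.List.enumerate_cons, pv_enumerate_shift]
  simp only [List.map_cons, List.map_map, List.sum_cons, Function.comp_def]
  have htail : ((PySem.List.enumerate cs 0).map
      (fun p => (fun ic => if ic.2 = 'S' then (2 : Int) ^ (((c :: cs).take ic.1.toNat).count 'C') else 0) ((fun p : Int × Char => (p.1 + 1, p.2)) p))).sum
      = (if c = 'C' then 2 else 1) * ((PySem.List.enumerate cs 0).map
      (fun ic => if ic.2 = 'S' then (2 : Int) ^ ((cs.take ic.1.toNat).count 'C') else 0)).sum := by
    rw [List.map_congr_left (g := fun ic => (if c = 'C' then (2:Int) else 1) * (if ic.2 = 'S' then (2 : Int) ^ ((cs.take ic.1.toNat).count 'C') else 0)) ?_]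
    · exact List.sum_map_mul_left _ _ _
    · intro p hp
      rcases (PySem.List.mem_enumerate_iff _ _ _).1 hp with ⟨k, hk, rfl⟩
      simp only [Int.zero_add]
      have h1 : ((k : Int) + 1).toNat = k + 1 := by omega
      simp only [h1, List.take_succ_cons, List.count_cons]
      by_cases hS : cs[k] = 'S' <;> by_cases hC : c = 'C' <;>
        simp [hS, hC, pow_succ, mul_comm]
  rw [htail]
  simp [List.count_nil]

theorem pv_main (l : List Char) (d t : Int) :
    (l.foldl pvStep (d, t)).2 = t + d * pvT l := by
  induction l generalizing d t with
  | nil => simp [pvT, PySem.List.enumerate_nil]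
  | cons c cs ih =>
      by_cases hC : c = 'C'
      · simp [pvStep, hC, ih, pvT_cons]; ring
      · by_cases hS : c = 'S'
        · simp [pvStep, hS, ih, pvT_cons]; ring
        · simp [pvStep, hC, hS, ih, pvT_cons]

-- ===== VERDICT (by name: the statement is the Claim_ definition above) =====
theorem get_damage_spec : Claim_equal_get_damage := by
  intro combos _
  unfold Spec_get_damage get_damage get_damage_alt
  have := pv_main combos.toList 1 0
  simpa [pvStep, pvT] using this
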